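-- pv_equiv track=rewrite | github.com/Devam759/VISTA | database/generate_sample_data.py | generate_room_numbers
-- ===== SOURCE A (Python) =====
-- def generate_room_numbers(count, hostel_prefix):
--     """Generate room numbers"""
--     rooms = []
--     floor = 1
--     room_num = 1
--
--     for i in range(count):
--         if room_num > 20:  # 20 rooms per floor
--             floor += 1
--             room_num = 1
--
--         room_number = f"{hostel_prefix}-{floor:02d}{room_num:02d}"
--         rooms.append(room_number)
--         room_num += 1
--
--     return rooms
-- ===== SOURCE B (Python) =====
-- def generate_room_numbers(count, hostel_prefix):
--     """Generate room numbers"""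
--     return [f"{hostel_prefix}-{i // 20 + 1:02d}{i % 20 + 1:02d}" for i in range(count)]
-- ===== Notes on version B (the rewrite author's own statement) =====
-- stated objective: simpler
-- what changed: Replaces the stateful floor/room counters and reset branch with a single stateless comprehension that derives each room's floor (i//20+1) and room-within-floor (i%20+1) directly from its index.
import Mathlib
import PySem

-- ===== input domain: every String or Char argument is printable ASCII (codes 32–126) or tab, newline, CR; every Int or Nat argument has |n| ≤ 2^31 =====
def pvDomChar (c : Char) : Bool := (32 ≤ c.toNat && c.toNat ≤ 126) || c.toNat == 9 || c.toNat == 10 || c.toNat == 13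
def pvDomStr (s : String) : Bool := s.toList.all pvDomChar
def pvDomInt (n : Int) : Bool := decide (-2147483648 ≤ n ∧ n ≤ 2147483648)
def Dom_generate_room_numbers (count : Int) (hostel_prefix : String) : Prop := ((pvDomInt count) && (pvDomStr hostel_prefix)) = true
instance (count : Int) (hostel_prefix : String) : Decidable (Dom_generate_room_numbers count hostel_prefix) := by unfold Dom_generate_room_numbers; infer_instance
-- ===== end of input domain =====

-- B replaces A's stateful floor/room counters and reset branch by a stateless
-- comprehension deriving floor and room from the index (simpler decomposition).

-- ===== PORT A =====
-- f"{n:02d}": exact for 0 ≤ n (the only values formatted here: floor ≥ 1, room ≥ 1)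
def pad2 (n : Int) : String :=
  if n < 10 then "0" ++ PySem.Int.toStr n else PySem.Int.toStr n

-- one iteration of A's for-loop (the reset branch, the append, the increment)
def stepA (hostel_prefix : String) (st : List String × Int × Int) (_i : Int) :
    List String × Int × Int :=
  let rooms := st.1
  let p := if st.2.2 > 20 then (st.2.1 + 1, (1 : Int)) else st.2
  (rooms ++ [hostel_prefix ++ "-" ++ pad2 p.1 ++ pad2 p.2], p.1, p.2 + 1)

def generate_room_numbers (count : Int) (hostel_prefix : String) : List String :=
  -- rooms = []; floor = 1; room_num = 1; for i in range(count): …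
  ((PySem.List.pyRange 0 count 1).foldl (stepA hostel_prefix) ([], 1, 1)).1

-- ===== PORT B =====
def generate_room_numbers_alt (count : Int) (hostel_prefix : String) : List String :=
  (PySem.List.pyRange 0 count 1).map
    (fun i => hostel_prefix ++ "-" ++ pad2 (PySem.Int.floordiv i 20 + 1)
                ++ pad2 (PySem.Int.mod i 20 + 1))

-- ===== PRECONDITION & SPEC =====
def Spec_generate_room_numbers (count : Int) (hostel_prefix : String) (out : List String) : Prop := out = generate_room_numbers_alt count hostel_prefix
instance (count : Int) (hostel_prefix : String) (out : List String) : Decidable (Spec_generate_room_numbers count hostel_prefix out) := by unfold Spec_generate_room_numbers; infer_instance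

-- ===== CLAIM (what is proved, stated in full; the proofs are below) =====
def Claim_equal_generate_room_numbers : Prop := ∀ (count : Int) (hostel_prefix : String), Dom_generate_room_numbers count hostel_prefix → Spec_generate_room_numbers count hostel_prefix (generate_room_numbers count hostel_prefix)

-- ===== LEMMAS AND PROOFS =====

-- the raw (pre-reset) state of A's loop after b rooms have been emitted
def rawF (b : Int) : Int := if b = 0 then 1 else (b - 1) / 20 + 1
def rawR (b : Int) : Int := if b = 0 then 1 else (b - 1) % 20 + 2

lemma norm_raw (b : Int) (_hb : 0 ≤ b) :
    (if rawR b > 20 then (rawF b + 1, (1 : Int)) else (rawF b, rawR b))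
      = (PySem.Int.floordiv b 20 + 1, PySem.Int.mod b 20 + 1) := by
  rw [PySem.Int.floordiv_eq_ediv_of_pos (by norm_num : (0:Int) < 20),
      PySem.Int.mod_eq_emod_of_pos (by norm_num : (0:Int) < 20)]
  unfold rawF rawR
  split_ifs <;> simp [Prod.ext_iff] <;> omega

lemma raw_succ (b : Int) (hb : 0 ≤ b) :
    (PySem.Int.floordiv b 20 + 1, PySem.Int.mod b 20 + 1 + 1) = (rawF (b + 1), rawR (b + 1)) := by
  rw [PySem.Int.floordiv_eq_ediv_of_pos (by norm_num : (0:Int) < 20),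
      PySem.Int.mod_eq_emod_of_pos (by norm_num : (0:Int) < 20)]
  unfold rawF rawR
  split_ifs <;> simp [Prod.ext_iff] <;> omega

lemma stepA_raw (hostel_prefix : String) (b x : Int) (acc : List String) (hb : 0 ≤ b) :
    stepA hostel_prefix (acc, rawF b, rawR b) x
      = (acc ++ [hostel_prefix ++ "-" ++ pad2 (PySem.Int.floordiv b 20 + 1)
            ++ pad2 (PySem.Int.mod b 20 + 1)], rawF (b + 1), rawR (b + 1)) := by
  unfold stepA
  simp only []
  rw [norm_raw b hb]
  have h2 := raw_succ b hb
  rw [Prod.mk.injEq] at h2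
  simp only [Prod.mk.injEq]
  exact ⟨trivial, h2.1, h2.2⟩

lemma loopA (hostel_prefix : String) (l : List Int) :
    ∀ (b : Int) (acc : List String), 0 ≤ b →
    (l.foldl (stepA hostel_prefix) (acc, rawF b, rawR b)).1
    = acc ++ (PySem.List.pyRange b (b + l.length) 1).map
        (fun i => hostel_prefix ++ "-" ++ pad2 (PySem.Int.floordiv i 20 + 1)
                    ++ pad2 (PySem.Int.mod i 20 + 1)) := by
  induction l with
  | nil => intro b acc _; simp [PySem.List.pyRange_one_eq_nil (le_refl b)]
  | cons x xs ih =>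
    intro b acc hb
    have hrange : PySem.List.pyRange b (b + ((x :: xs).length : Int)) 1
        = b :: PySem.List.pyRange (b + 1) (b + 1 + (xs.length : Int)) 1 := by
      have he : b + (((x :: xs).length : Nat) : Int) = (b + 1) + ((xs.length : Nat) : Int) := by
        simp only [List.length_cons]; push_cast; omega
      rw [he, PySem.List.pyRange_one_cons (by omega)]
    rw [List.foldl_cons, stepA_raw hostel_prefix b x acc hb,
        ih (b + 1) _ (by omega), hrange]
    simp

theorem generate_room_numbers_spec : Claim_equal_generate_room_numbers := by
  intro count hostel_prefix _
  unfold Spec_generate_room_numbers generate_room_numbers generate_room_numbers_alt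
  have h0 : rawF 0 = 1 ∧ rawR 0 = 1 := by unfold rawF rawR; simp
  rw [show ((1 : Int), (1 : Int)) = (rawF 0, rawR 0) by rw [h0.1, h0.2]]
  rw [loopA hostel_prefix (PySem.List.pyRange 0 count 1) 0 [] (le_refl 0)]
  by_cases hc : count ≤ 0
  · simp [PySem.List.pyRange_one_eq_nil hc]
  · have hlen : ((PySem.List.pyRange 0 count 1).length : Int) = count := by
      rw [PySem.List.length_pyRange_one]; omega
    rw [hlen]
    simp
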